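-- pv_equiv track=rewrite | github.com/chanteriam/ShoulderToShoulder | backend/shoulder/s2s/views.py | parse_similarity_metrics
-- ===== SOURCE A (Python) =====
-- def parse_similarity_metrics(metrics):
--     """
--     Helper function to parse user similarity metrics data, formatting and standardizing
--     it into the PanelUserPreferencess row
--
--     Inputs:
--         metrics (lst): List of user's similarity metrics data
--
--     Returns: parsed_metrics (dict): dictionary of user's similarity metrics data
--     """
--     similarity_metrics_mapping = {
--         "Gender": "pref_gender_similar",
--         "Race or Ethnicity": "pref_race_similar",
--         "Age range": "pref_age_similar",
--         "Sexual Orientation": "pref_sexual_orientation_similar",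
--         "Religious Affiliation": "pref_religion_similar",
--         "Political Leaning": "pref_political_leaning_similar",
--     }
--
--     if not metrics:
--         return {metric: False for metric in similarity_metrics_mapping.values()}
--     else:
--         # If metrics list is not empty, set corresponding values to True
--         parsed_metrics = {}
--         for preference, field in similarity_metrics_mapping.items():
--             parsed_metrics[field] = preference in metrics
--
--         return parsed_metrics
-- ===== SOURCE B (Python) =====
-- def parse_similarity_metrics(metrics):
--     """Input-driven rewrite: initialize every field to False, then walk the
--     input list once, flipping fields found via the name->field mapping."""
--     similarity_metrics_mapping = {
--         "Gender": "pref_gender_similar",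
--         "Race or Ethnicity": "pref_race_similar",
--         "Age range": "pref_age_similar",
--         "Sexual Orientation": "pref_sexual_orientation_similar",
--         "Religious Affiliation": "pref_religion_similar",
--         "Political Leaning": "pref_political_leaning_similar",
--     }
--     parsed_metrics = {field: False for field in similarity_metrics_mapping.values()}
--     for name in metrics or ():
--         field = similarity_metrics_mapping.get(name)
--         if field is not None:
--             parsed_metrics[field] = True
--     return parsed_metrics
-- ===== Notes on version B (the rewrite author's own statement) =====
-- stated objective: alternative
-- what changed: B initializes all six fields to False and drives a single pass over the input metrics list, setting fields True via a name-to-field dict lookup, instead of A's scan over the mapping with a membership test of each name in the metrics list.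
import Mathlib
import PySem

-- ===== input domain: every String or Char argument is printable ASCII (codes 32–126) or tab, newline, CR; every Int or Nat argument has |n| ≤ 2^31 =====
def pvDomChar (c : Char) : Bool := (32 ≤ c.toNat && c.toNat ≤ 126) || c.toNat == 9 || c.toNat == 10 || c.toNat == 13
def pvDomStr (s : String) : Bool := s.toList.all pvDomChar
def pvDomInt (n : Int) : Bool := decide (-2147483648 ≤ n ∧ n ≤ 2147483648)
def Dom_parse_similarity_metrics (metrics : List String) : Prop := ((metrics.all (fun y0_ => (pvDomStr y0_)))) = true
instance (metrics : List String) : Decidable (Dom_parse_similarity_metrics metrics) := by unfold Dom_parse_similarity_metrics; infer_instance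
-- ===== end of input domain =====

-- B builds the result input-driven: all fields start False, one pass over the metrics
-- list sets fields True via a name→field lookup (objective: alternative decomposition).


-- ===== PORT A =====
-- the module-level mapping literal (shared: both Pythons contain this same dict literal)
def similarity_metrics_mapping : List (String × String) :=
  [("Gender", "pref_gender_similar"),
   ("Race or Ethnicity", "pref_race_similar"),
   ("Age range", "pref_age_similar"),
   ("Sexual Orientation", "pref_sexual_orientation_similar"),
   ("Religious Affiliation", "pref_religion_similar"),
   ("Political Leaning", "pref_political_leaning_similar")]

def parse_similarity_metrics (metrics : List String) : List (String × Bool) :=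
  if metrics.isEmpty then
    -- {metric: False for metric in similarity_metrics_mapping.values()}
    ((similarity_metrics_mapping.map (·.2)).foldl
      (fun d metric => d.insert metric false) PySem.Dict.empty).items
  else
    -- for preference, field in mapping.items(): parsed_metrics[field] = preference in metrics
    (similarity_metrics_mapping.foldl
      (fun d pf => d.insert pf.2 (metrics.contains pf.1)) PySem.Dict.empty).items

-- ===== PORT B =====
-- for name in metrics or (): field = mapping.get(name); if field is not None: parsed[field] = True
def parse_similarity_metrics_alt_loop
    (d : PySem.Dict String Bool) (metrics : List String) : PySem.Dict String Bool :=
  metrics.foldl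
    (fun d name =>
      match (PySem.Dict.ofList similarity_metrics_mapping).get? name with
      | some field => d.insert field true
      | none => d) d

def parse_similarity_metrics_alt (metrics : List String) : List (String × Bool) :=
  -- parsed_metrics = {field: False for field in mapping.values()}
  let init := (similarity_metrics_mapping.map (·.2)).foldl
      (fun d field => d.insert field false) PySem.Dict.empty
  (parse_similarity_metrics_alt_loop init metrics).items

-- ===== PRECONDITION & SPEC =====
def Spec_parse_similarity_metrics (metrics : List String) (out : List (String × Bool)) : Prop := out = parse_similarity_metrics_alt metrics
instance (metrics : List String) (out : List (String × Bool)) : Decidable (Spec_parse_similarity_metrics metrics out) := by unfold Spec_parse_similarity_metrics; infer_instance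

-- ===== CLAIM (what is proved, stated in full; the proofs are below) =====
def Claim_equal_parse_similarity_metrics : Prop := ∀ (metrics : List String), Dom_parse_similarity_metrics metrics → Spec_parse_similarity_metrics metrics (parse_similarity_metrics metrics)

-- ===== LEMMAS AND PROOFS =====

-- B's loop over a dict holding exactly the six fields (any values) ORs each field
-- with whether its metric name occurs in the processed list.
lemma alt_loop_six (ms : List String) (b1 b2 b3 b4 b5 b6 : Bool) :
    parse_similarity_metrics_alt_loop
      (PySem.Dict.mk [("pref_gender_similar", b1), ("pref_race_similar", b2),
        ("pref_age_similar", b3), ("pref_sexual_orientation_similar", b4),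
        ("pref_religion_similar", b5), ("pref_political_leaning_similar", b6)]) ms
    = PySem.Dict.mk [("pref_gender_similar", b1 || ms.contains "Gender"),
        ("pref_race_similar", b2 || ms.contains "Race or Ethnicity"),
        ("pref_age_similar", b3 || ms.contains "Age range"),
        ("pref_sexual_orientation_similar", b4 || ms.contains "Sexual Orientation"),
        ("pref_religion_similar", b5 || ms.contains "Religious Affiliation"),
        ("pref_political_leaning_similar", b6 || ms.contains "Political Leaning")] := by
  induction ms generalizing b1 b2 b3 b4 b5 b6 with
  | nil => simp [parse_similarity_metrics_alt_loop]
  | cons m ms ih =>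
    by_cases h1 : m = "Gender"
    · subst h1
      simpa [parse_similarity_metrics_alt_loop, similarity_metrics_mapping,
        PySem.Dict.insert, List.foldl] using ih true b2 b3 b4 b5 b6
    · by_cases h2 : m = "Race or Ethnicity"
      · subst h2
        simpa [parse_similarity_metrics_alt_loop, similarity_metrics_mapping,
          PySem.Dict.insert, List.foldl] using ih b1 true b3 b4 b5 b6
      · by_cases h3 : m = "Age range"
        · subst h3
          simpa [parse_similarity_metrics_alt_loop, similarity_metrics_mapping,
            PySem.Dict.insert, List.foldl] using ih b1 b2 true b4 b5 b6
        · by_cases h4 : m = "Sexual Orientation"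
          · subst h4
            simpa [parse_similarity_metrics_alt_loop, similarity_metrics_mapping,
              PySem.Dict.insert, List.foldl] using ih b1 b2 b3 true b5 b6
          · by_cases h5 : m = "Religious Affiliation"
            · subst h5
              simpa [parse_similarity_metrics_alt_loop, similarity_metrics_mapping,
                PySem.Dict.insert, List.foldl] using ih b1 b2 b3 b4 true b6
            · by_cases h6 : m = "Political Leaning"
              · subst h6
                simpa [parse_similarity_metrics_alt_loop, similarity_metrics_mapping,
                  PySem.Dict.insert, List.foldl] using ih b1 b2 b3 b4 b5 true
              · have hget : (PySem.Dict.ofList similarity_metrics_mapping).get? m = none := by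
                  rw [show PySem.Dict.ofList similarity_metrics_mapping
                      = PySem.Dict.mk [("Gender", "pref_gender_similar"),
                          ("Race or Ethnicity", "pref_race_similar"),
                          ("Age range", "pref_age_similar"),
                          ("Sexual Orientation", "pref_sexual_orientation_similar"),
                          ("Religious Affiliation", "pref_religion_similar"),
                          ("Political Leaning", "pref_political_leaning_similar")] from by decide]
                  simp [PySem.Dict.get?,
                    Ne.symm h1, Ne.symm h2, Ne.symm h3, Ne.symm h4, Ne.symm h5, Ne.symm h6]
                simp only [parse_similarity_metrics_alt_loop, List.foldl] at ih ⊢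
                rw [hget]
                simpa [List.contains_cons, h1, h2, h3, h4, h5, h6,
                  Ne.symm h1, Ne.symm h2, Ne.symm h3, Ne.symm h4, Ne.symm h5, Ne.symm h6]
                  using ih b1 b2 b3 b4 b5 b6

-- A's fold over the six mapping entries, for ANY value function of the metric name
lemma a_fold_eq (g : String → Bool) :
    similarity_metrics_mapping.foldl
      (fun d pf => d.insert pf.2 (g pf.1)) PySem.Dict.empty
    = PySem.Dict.mk [("pref_gender_similar", g "Gender"),
        ("pref_race_similar", g "Race or Ethnicity"),
        ("pref_age_similar", g "Age range"),
        ("pref_sexual_orientation_similar", g "Sexual Orientation"),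
        ("pref_religion_similar", g "Religious Affiliation"),
        ("pref_political_leaning_similar", g "Political Leaning")] := rfl

-- ===== VERDICT (by name: the statement is the Claim_ definition above) =====
theorem parse_similarity_metrics_spec : Claim_equal_parse_similarity_metrics := by
  intro metrics _
  show _ = _
  cases metrics with
  | nil => decide
  | cons m ms =>
    simp only [parse_similarity_metrics, parse_similarity_metrics_alt, List.isEmpty_cons]
    rw [show ((similarity_metrics_mapping.map (·.2)).foldl
        (fun d field => d.insert field false) PySem.Dict.empty)
      = PySem.Dict.mk [("pref_gender_similar", false), ("pref_race_similar", false),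
          ("pref_age_similar", false), ("pref_sexual_orientation_similar", false),
          ("pref_religion_similar", false), ("pref_political_leaning_similar", false)]
      from by decide]
    rw [alt_loop_six, a_fold_eq (fun p => (m :: ms).contains p)]
    simp
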